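-- pv_equiv track=rewrite | github.com/Smith-Danielle/PythonPractice1 | main.py | solution
-- ===== SOURCE A (Python) =====
-- def solution(s):
--     alpha = "abcdefghijklmnopqrstuvwxyz"
--     sliced = ""
--     temp = ""
--     for x in s:
--         if len(temp) == 0:
--             temp += x
--         else:
--             temp += x
--             if temp not in alpha:
--                 sliced += temp[:-1][::-1]
--                 temp = temp[len(temp) - 1]
--     if len(temp) > 0:
--         sliced += temp[::-1]
--     return sliced
-- ===== SOURCE B (Python) =====
-- def solution(s):
--     parts = []
--     i = 0
--     while i < len(s):
--         j = i + 1
--         while j < len(s) and 'a' <= s[j-1] <= 'z' and s[j] <= 'z' and ord(s[j]) == ord(s[j-1]) + 1: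
--             j += 1
--         parts.append(s[i:j][::-1])
--         i = j
--     return ''.join(parts)
-- ===== Notes on version B (the rewrite author's own statement) =====
-- stated objective: alternative
-- what changed: A runs a single accumulator state machine that grows a temp buffer and tests the whole buffer as a substring of the alphabet string, flushing reversed pieces on a break; B is a recursive decomposition that peels the maximal leading run using an O(1) successor-code comparison on the last character, reverses it, and recurses on the remainder.
import Mathlib
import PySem

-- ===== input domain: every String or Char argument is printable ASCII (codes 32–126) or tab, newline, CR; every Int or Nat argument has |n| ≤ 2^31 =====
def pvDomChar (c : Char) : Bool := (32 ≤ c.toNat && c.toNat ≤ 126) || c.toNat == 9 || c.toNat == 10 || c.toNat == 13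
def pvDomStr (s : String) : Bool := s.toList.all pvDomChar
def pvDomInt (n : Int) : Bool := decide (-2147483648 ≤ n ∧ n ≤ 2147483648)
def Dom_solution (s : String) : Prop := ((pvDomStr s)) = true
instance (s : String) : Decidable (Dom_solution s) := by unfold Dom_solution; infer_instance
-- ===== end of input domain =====

-- B replaces A's accumulator-and-flush scan (substring test of the growing buffer against the
-- alphabet string) by a two-pointer loop that finds each maximal run with an O(1) successor-code
-- comparison, then reverses the slice; objective: alternative.

-- ===== PORT A =====
def pvAlpha : List Char := "abcdefghijklmnopqrstuvwxyz".toList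

-- one step of A's for-loop; state = (sliced, temp)
def pvStepA (st : List Char × List Char) (x : Char) : List Char × List Char :=
  if st.2.length = 0 then (st.1, st.2 ++ [x])
  else
    let temp := st.2 ++ [x]
    -- 'temp not in alpha' = substring test (PySem.Chars.isIn is exact for Python 'in')
    if ¬ (PySem.Chars.isIn temp pvAlpha = true) then
      -- temp[:-1][::-1] = dropLast then reverse; temp[len(temp)-1] = last char (temp nonempty here)
      (st.1 ++ temp.dropLast.reverse, [temp.getLast!])
    else (st.1, temp)

def solution (s : String) : String :=
  let st := s.toList.foldl pvStepA ([], [])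
  String.ofList (if st.2.length > 0 then st.1 ++ st.2.reverse else st.1)

-- ===== PORT B =====
-- Source B's inner while loop: advance j while s[j-1], s[j] are consecutive lowercase letters
-- ('a' = 97, 'z' = 122; the ord comparisons are written on Char.toNat; s[j-1]/s[j] are read
-- with getD — both indices are in range whenever the loop guard j < len(s) holds)
def pvScan (l : List Char) (j : Nat) : Nat :=
  if h : j < l.length ∧
      (97 ≤ (l.getD (j - 1) 'a').toNat ∧ (l.getD (j - 1) 'a').toNat ≤ 122 ∧
       (l.getD j 'a').toNat ≤ 122 ∧
       (l.getD j 'a').toNat = (l.getD (j - 1) 'a').toNat + 1) then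
    pvScan l (j + 1)
  else j
termination_by l.length - j
decreasing_by omega

-- needed by pvOuter's termination proof
theorem pvScan_ge (l : List Char) (j : Nat) : j ≤ pvScan l j := by
  induction j using pvScan.induct l with
  | case1 j h ih => rw [pvScan, dif_pos h]; omega
  | case2 j h => rw [pvScan, dif_neg h]

-- Source B's outer while loop; parts accumulates the reversed run slices s[i:j][::-1]
def pvOuter (l : List Char) (i : Nat) (parts : List (List Char)) : List (List Char) :=
  if i < l.length then
    let j := pvScan l (i + 1)
    pvOuter l j (parts ++ [(PySem.List.slice l (some (i : Int)) (some (j : Int))).reverse])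
  else parts
termination_by l.length - i
decreasing_by
  have := pvScan_ge l (i + 1)
  omega

-- ''.join(parts) = flatten
def solution_alt (s : String) : String := String.ofList (pvOuter s.toList 0 []).flatten

-- ===== PRECONDITION & SPEC =====
def Spec_solution (s : String) (out : String) : Prop := out = solution_alt s
instance (s : String) (out : String) : Decidable (Spec_solution s out) := by unfold Spec_solution; infer_instance

-- ===== CLAIM (what is proved, stated in full; the proofs are below) =====
def Claim_equal_solution : Prop := ∀ (s : String), Dom_solution s → Spec_solution s (solution s)

-- ===== LEMMAS AND PROOFS =====

set_option maxRecDepth 4000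

-- B's successor test as a Prop on the last char of the run
abbrev pvAdj (c y : Char) : Prop :=
  97 ≤ c.toNat ∧ c.toNat ≤ 122 ∧ y.toNat ≤ 122 ∧ y.toNat = c.toNat + 1

-- proof-layer middle form: peel the maximal leading run recursively (both ports are reduced to it)
def pvTakeRun (run : List Char) (rest : List Char) : List Char × List Char :=
  match rest with
  | [] => (run, [])
  | y :: ys =>
    if pvAdj run.getLast! y then pvTakeRun (run ++ [y]) ys
    else (run, y :: ys)

theorem pvTakeRun_snd_len_le (run rest : List Char) :
    (pvTakeRun run rest).2.length ≤ rest.length := by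
  induction rest generalizing run with
  | nil => simp [pvTakeRun]
  | cons y ys ih =>
    simp only [pvTakeRun]
    split
    · exact Nat.le_trans (ih _) (Nat.le_succ _)
    · exact Nat.le_refl _

def pvAltList (l : List Char) : List Char :=
  match l with
  | [] => []
  | c :: cs =>
    let p := pvTakeRun [c] cs
    p.1.reverse ++ pvAltList p.2
termination_by l.length
decreasing_by
  simpa using Nat.lt_succ_of_le (pvTakeRun_snd_len_le [c] cs)

-- invariant on A's temp: empty, a single char, or a substring of the alphabet
def pvRunInv (t : List Char) : Prop := t = [] ∨ t.length = 1 ∨ t <:+: pvAlpha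

theorem pvAlpha_eq :
    pvAlpha = ['a','b','c','d','e','f','g','h','i','j','k','l','m',
               'n','o','p','q','r','s','t','u','v','w','x','y','z'] := rfl

theorem pvAlpha_mem_bounds : ∀ c ∈ pvAlpha, 97 ≤ c.toNat ∧ c.toNat ≤ 122 := by
  intro c hc
  rw [pvAlpha_eq] at hc
  fin_cases hc <;> decide

theorem pvAlpha_chain : List.IsChain (fun a b => b.toNat = a.toNat + 1) pvAlpha := by
  rw [pvAlpha_eq]; simp [List.isChain_cons_cons]

theorem pvAlpha_drop : ∀ k < 26, pvAlpha.drop k = Char.ofNat (97 + k) :: pvAlpha.drop (k + 1) := by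
  rw [pvAlpha_eq]; decide

-- a contiguous piece of the alphabet = all chars in [97,122] and consecutive codes
theorem pv_infix_alpha_iff (t : List Char) :
    t <:+: pvAlpha ↔
      ((∀ c ∈ t, 97 ≤ c.toNat ∧ c.toNat ≤ 122) ∧
       t.IsChain (fun a b => b.toNat = a.toNat + 1)) := by
  constructor
  · intro h
    obtain ⟨u, v, huv⟩ := h
    have hchain : List.IsChain (fun a b => b.toNat = a.toNat + 1) (u ++ (t ++ v)) := by
      rw [← List.append_assoc, huv]; exact pvAlpha_chain
    have ht := (List.isChain_append.mp (List.isChain_append.mp hchain).2.1).1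
    refine ⟨fun c hc => pvAlpha_mem_bounds c ?_, ht⟩
    rw [← huv]; simp [hc]
  · rintro ⟨hb, hc⟩
    have key : ∀ (ts : List Char) (c : Char), (∀ d ∈ c :: ts, 97 ≤ d.toNat ∧ d.toNat ≤ 122) →
        (c :: ts).IsChain (fun a b => b.toNat = a.toNat + 1) →
        (c :: ts) <+: pvAlpha.drop (c.toNat - 97) := by
      intro ts
      induction ts with
      | nil =>
        intro c hb _
        have hcb := hb c (by simp)
        have hdrop := pvAlpha_drop (c.toNat - 97) (by omega)
        have hch : Char.ofNat (97 + (c.toNat - 97)) = c := by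
          have h97 : 97 + (c.toNat - 97) = c.toNat := by omega
          rw [h97]
          exact Char.ofNat_toNat (by have := hcb.2; omega)
        rw [hdrop, hch]
        simp
      | cons d ds ih =>
        intro c hb hc
        have hcb := hb c (by simp)
        have hdb := hb d (by simp)
        have hdc : d.toNat = c.toNat + 1 := (List.isChain_cons_cons.mp hc).1
        have hdrop := pvAlpha_drop (c.toNat - 97) (by omega)
        have hch : Char.ofNat (97 + (c.toNat - 97)) = c := by
          have h97 : 97 + (c.toNat - 97) = c.toNat := by omega
          rw [h97]
          exact Char.ofNat_toNat (by have := hcb.2; omega)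
        rw [hdrop, hch]
        have htail := ih d (fun x hx => hb x (by simp at hx ⊢; tauto))
          (List.isChain_cons_cons.mp hc).2
        have hidx : d.toNat - 97 = c.toNat - 97 + 1 := by omega
        rw [hidx] at htail
        exact List.cons_prefix_cons.mpr ⟨rfl, htail⟩
    cases t with
    | nil => exact List.nil_infix
    | cons c ts =>
      have hpre := key ts c hb hc
      exact hpre.isInfix.trans (List.drop_suffix _ _).isInfix

-- the step test of A, evaluated on an invariant-satisfying temp, is B's successor test
theorem pv_isIn_step (t : List Char) (x : Char) (hinv : pvRunInv t) (hne : t ≠ []) :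
    (PySem.Chars.isIn (t ++ [x]) pvAlpha = true ↔ pvAdj (t.getLast hne) x) := by
  rw [PySem.Chars.isIn_iff_infix, pv_infix_alpha_iff]
  have hlast : t.getLast hne ∈ t := List.getLast_mem hne
  constructor
  · rintro ⟨hb, hc⟩
    have hbl := hb (t.getLast hne) (by simp [hlast])
    have hbx := hb x (by simp)
    have hrel : x.toNat = (t.getLast hne).toNat + 1 := by
      have h2 := (List.isChain_append.mp hc).2.2
      exact h2 (t.getLast hne) (by simp [List.getLast?_eq_some_getLast hne]) x rfl
    exact ⟨hbl.1, hbl.2, hbx.2, hrel⟩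
  · rintro ⟨h1, h2, h3, h4⟩
    have hbt : ∀ c ∈ t, 97 ≤ c.toNat ∧ c.toNat ≤ 122 := by
      rcases hinv with h | h | h
      · exact absurd h hne
      · intro c hc
        obtain ⟨a, rfl⟩ := List.length_eq_one_iff.mp h
        simp at hc; subst hc
        simp only [List.getLast_singleton] at h1 h2
        exact ⟨h1, h2⟩
      · exact fun c hc => ((pv_infix_alpha_iff t).mp h).1 c hc
    have hct : t.IsChain (fun a b => b.toNat = a.toNat + 1) := by
      rcases hinv with h | h | h
      · exact absurd h hne
      · obtain ⟨a, rfl⟩ := List.length_eq_one_iff.mp h; simp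
      · exact ((pv_infix_alpha_iff t).mp h).2
    refine ⟨?_, ?_⟩
    · intro c hc
      rcases List.mem_append.mp hc with h | h
      · exact hbt c h
      · simp at h; subst h; omega
    · rw [List.isChain_append]
      refine ⟨hct, by simp, ?_⟩
      intro a ha b hb
      rw [List.getLast?_eq_some_getLast hne] at ha
      simp at ha; subst ha
      simp at hb; subst hb
      exact h4

-- unfolding of pvTakeRun on a cons with the last element named
theorem pvTakeRun_cons (run : List Char) (y : Char) (ys : List Char) (h : run ≠ []) :
    pvTakeRun run (y :: ys) =
      if pvAdj (run.getLast h) y then pvTakeRun (run ++ [y]) ys else (run, y :: ys) := by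
  have hl : run.getLast! = run.getLast h := by
    simp [List.getLast!_eq_getLast?_getD, List.getLast?_eq_some_getLast h]
  simp only [pvTakeRun, hl]

-- flushing A's final state
theorem pv_flush (st : List Char × List Char) :
    (if st.2.length > 0 then st.1 ++ st.2.reverse else st.1) = st.1 ++ st.2.reverse := by
  rcases st with ⟨a, t⟩
  cases t <;> simp

-- A's fold from a nonempty invariant temp = reverse of the peeled run + recursion on the rest
theorem pv_main (l : List Char) :
    ∀ (temp sliced : List Char), pvRunInv temp → temp ≠ [] →
      (l.foldl pvStepA (sliced, temp)).1 ++ (l.foldl pvStepA (sliced, temp)).2.reverse =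
      sliced ++ ((pvTakeRun temp l).1.reverse ++ pvAltList (pvTakeRun temp l).2) := by
  induction l with
  | nil =>
    intro temp sliced _ _
    simp [pvTakeRun, pvAltList]
  | cons x xs ih =>
    intro temp sliced hinv hne
    have hlen : ¬ temp.length = 0 := by simpa using hne
    rw [pvTakeRun_cons temp x xs hne]
    by_cases hadj : pvAdj (temp.getLast hne) x
    · -- A keeps extending temp; the peeled run keeps extending
      have hin : PySem.Chars.isIn (temp ++ [x]) pvAlpha = true :=
        (pv_isIn_step temp x hinv hne).mpr hadj
      have hstep : pvStepA (sliced, temp) x = (sliced, temp ++ [x]) := by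
        simp [pvStepA, hlen, hin]
      have hinv' : pvRunInv (temp ++ [x]) := by
        right; right; exact (PySem.Chars.isIn_iff_infix _ _).mp hin
      simp only [List.foldl_cons, hstep, if_pos hadj]
      exact ih (temp ++ [x]) sliced hinv' (by simp)
    · -- A flushes temp and restarts from x; the run is closed
      have hin : ¬ PySem.Chars.isIn (temp ++ [x]) pvAlpha = true :=
        fun h => hadj ((pv_isIn_step temp x hinv hne).mp h)
      have hstep : pvStepA (sliced, temp) x = (sliced ++ temp.reverse, [x]) := by
        simp [pvStepA, hlen, hin]
      simp only [List.foldl_cons, hstep, if_neg hadj]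
      rw [ih [x] (sliced ++ temp.reverse) (Or.inr (Or.inl rfl)) (by simp)]
      simp only [pvAltList]
      simp

-- top-level list form of A = the middle form
theorem pv_top (l : List Char) :
    (if (l.foldl pvStepA ([], [])).2.length > 0
      then (l.foldl pvStepA ([], [])).1 ++ (l.foldl pvStepA ([], [])).2.reverse
      else (l.foldl pvStepA ([], [])).1) = pvAltList l := by
  cases l with
  | nil => simp [pvAltList]
  | cons c cs =>
    have h0 : pvStepA ([], []) c = ([], [c]) := by simp [pvStepA]
    rw [show (c :: cs).foldl pvStepA ([], []) = cs.foldl pvStepA ([], [c]) by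
      rw [List.foldl_cons, h0]]
    rw [pv_flush, pv_main cs [c] [] (Or.inr (Or.inl rfl)) (by simp)]
    simp [pvAltList]

-- B's inner scan computes exactly the peel of pvTakeRun
theorem pv_scan_takeRun (l : List Char) (j : Nat) :
    ∀ (run : List Char), run ≠ [] → 1 ≤ j → j ≤ l.length →
      run.getLast! = l.getD (j - 1) 'a' →
      pvTakeRun run (l.drop j) =
        (run ++ (l.drop j).take (pvScan l j - j), l.drop (pvScan l j)) := by
  induction j using pvScan.induct l with
  | case1 j h ih =>
    intro run hne hj hjl hlast
    have hjlen : j < l.length := h.1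
    have hdrop : l.drop j = l[j] :: l.drop (j + 1) := List.drop_eq_getElem_cons hjlen
    have hgetj : l.getD j 'a' = l[j] := List.getD_eq_getElem l 'a' hjlen
    have hadj : pvAdj run.getLast! l[j] := by
      rw [hlast]
      obtain ⟨-, h2⟩ := h
      rw [hgetj] at h2
      exact ⟨h2.1, h2.2.1, h2.2.2.1, h2.2.2.2⟩
    rw [hdrop]
    simp only [pvTakeRun, if_pos hadj]
    have hlast' : (run ++ [l[j]]).getLast! = l.getD ((j + 1) - 1) 'a' := by
      have hgl : (run ++ [l[j]]).getLast! = l[j] := by simp [List.getLast!_eq_getLast?_getD]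
      rw [hgl, Nat.add_sub_cancel, hgetj]
    rw [ih (run ++ [l[j]]) (by simp) (by omega) (by omega) hlast']
    have hscan : pvScan l j = pvScan l (j + 1) := by rw [pvScan, dif_pos h]
    have hge : j + 1 ≤ pvScan l (j + 1) := pvScan_ge l (j + 1)
    rw [hscan]
    have htake : (l[j] :: l.drop (j + 1)).take (pvScan l (j + 1) - j) =
        l[j] :: (l.drop (j + 1)).take (pvScan l (j + 1) - (j + 1)) := by
      have : pvScan l (j + 1) - j = (pvScan l (j + 1) - (j + 1)) + 1 := by omega
      rw [this, List.take_succ_cons]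
    rw [htake]
    simp
  | case2 j h =>
    intro run hne hj hjl hlast
    have hscan : pvScan l j = j := by rw [pvScan, dif_neg h]
    rw [hscan]
    simp only [Nat.sub_self, List.take_zero, List.append_nil]
    rcases Nat.lt_or_ge j l.length with hlt | hge
    · have hdrop : l.drop j = l[j] :: l.drop (j + 1) := List.drop_eq_getElem_cons hlt
      have hgetj : l.getD j 'a' = l[j] := List.getD_eq_getElem l 'a' hlt
      have hnadj : ¬ pvAdj run.getLast! l[j] := by
        rw [hlast]
        intro hc
        exact h ⟨hlt, by rw [hgetj]; exact ⟨hc.1, hc.2.1, hc.2.2.1, hc.2.2.2⟩⟩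
      rw [hdrop]
      simp only [pvTakeRun, if_neg hnadj]
    · have hdrop : l.drop j = [] := List.drop_eq_nil_of_le hge
      rw [hdrop]
      simp [pvTakeRun]

-- B's outer loop, flattened, is the middle form on the unprocessed suffix
theorem pv_outer (l : List Char) (i : Nat) (parts : List (List Char)) :
    (pvOuter l i parts).flatten = parts.flatten ++ pvAltList (l.drop i) := by
  induction i, parts using pvOuter.induct l with
  | case1 i parts hlt j ih =>
    rw [pvOuter, if_pos hlt]
    simp only []
    rw [ih]
    have hge : i + 1 ≤ pvScan l (i + 1) := pvScan_ge l (i + 1)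
    have hdrop : l.drop i = l[i] :: l.drop (i + 1) := List.drop_eq_getElem_cons hlt
    have hgeti : l.getD i 'a' = l[i] := List.getD_eq_getElem l 'a' hlt
    have hlast : ([l[i]] : List Char).getLast! = l.getD ((i + 1) - 1) 'a' := by
      simp [List.getLast!_eq_getLast?_getD, List.getD, List.getElem?_eq_getElem hlt]
    have htr := pv_scan_takeRun l (i + 1) [l[i]] (by simp) (by omega) (by omega) hlast
    have hslice : PySem.List.slice l (some (i : Int)) (some ((pvScan l (i + 1)) : Int)) =
        l[i] :: (l.drop (i + 1)).take (pvScan l (i + 1) - (i + 1)) := by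
      rw [PySem.List.slice_natCast, hdrop]
      have harith : pvScan l (i + 1) - i = (pvScan l (i + 1) - (i + 1)) + 1 := by omega
      rw [harith, List.take_succ_cons]
    rw [hdrop]
    simp only [pvAltList]
    rw [htr, hslice]
    simp
    rfl
  | case2 i parts h =>
    rw [pvOuter, if_neg h, List.drop_eq_nil_of_le (by omega)]
    simp [pvAltList]

-- ===== VERDICT (by name: the statement is the Claim_ definition above) =====
theorem solution_spec : Claim_equal_solution := by
  intro s _
  unfold Spec_solution solution solution_alt
  have h1 := pv_top s.toList
  have h2 := pv_outer s.toList 0 []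
  simp only [List.drop_zero, List.flatten_nil, List.nil_append] at h2
  exact congrArg String.ofList (h1.trans h2.symm)
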